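-- pv_equiv track=rewrite | github.com/jeong-sang-choi/kaggle_birdclf | final_mock_test.py | network_connectivity_check
-- ===== SOURCE A (Python) =====
-- from collections import deque, defaultdict
--
-- def network_connectivity_check(n, connections, start_node):
--     """
--     네트워크에서 특정 노드에서 연결 가능한 모든 노드 찾기
--
--     n: 노드 개수
--     connections: [(node1, node2), ...]
--     start_node: 시작 노드
--     """
--     # 그래프 구성
--     graph = defaultdict(list)
--     for node1, node2 in connections:
--         graph[node1].append(node2)
--         graph[node2].append(node1)
--
--     # BFS로 연결된 노드들 찾기
--     visited = set()
--     queue = deque([start_node])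
--     visited.add(start_node)
--
--     while queue:
--         current = queue.popleft()
--         for neighbor in graph[current]:
--             if neighbor not in visited:
--                 visited.add(neighbor)
--                 queue.append(neighbor)
--
--     return sorted(list(visited))
-- ===== SOURCE B (Python) =====
-- def network_connectivity_check(n, connections, start_node):
--     # Bellman-Ford-style closure: no adjacency list, no queue; repeatedly
--     # relax every edge into the component set until it must be saturated.
--     comp = {start_node}
--     for _ in range(2 * len(connections) + 1):
--         for a, b in connections:
--             if a in comp or b in comp:
--                 comp.add(a)
--                 comp.add(b)
--     return sorted(comp)
-- ===== Notes on version B (the rewrite author's own statement) =====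
-- stated objective: alternative
-- what changed: Replaces the adjacency-dict + BFS queue with Bellman-Ford-style edge relaxation: a bounded number of sweeps over the raw edge list grows the component set to its closure; no graph and no queue are built.
import Mathlib
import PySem

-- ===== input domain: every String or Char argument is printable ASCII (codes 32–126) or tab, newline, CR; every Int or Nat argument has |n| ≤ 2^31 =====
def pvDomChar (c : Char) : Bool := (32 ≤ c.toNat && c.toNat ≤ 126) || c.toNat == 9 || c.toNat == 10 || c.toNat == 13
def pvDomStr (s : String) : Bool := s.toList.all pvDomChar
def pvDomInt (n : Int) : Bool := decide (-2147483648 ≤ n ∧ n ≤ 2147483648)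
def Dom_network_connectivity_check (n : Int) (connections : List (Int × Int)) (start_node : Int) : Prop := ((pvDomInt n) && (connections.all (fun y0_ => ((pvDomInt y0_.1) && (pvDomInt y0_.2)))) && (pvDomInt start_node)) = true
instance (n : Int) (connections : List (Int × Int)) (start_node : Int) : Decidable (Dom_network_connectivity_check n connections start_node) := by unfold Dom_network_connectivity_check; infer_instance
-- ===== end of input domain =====

-- B replaces A's adjacency-dict + BFS queue with bounded Bellman-Ford-style sweeps over the
-- raw edge list (objective: alternative algorithm of the same result, not claimed faster).

-- ===== PORT A =====
-- graph = defaultdict(list); for node1, node2 in connections: graph[node1].append(node2); graph[node2].append(node1)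
def ncc_graph (connections : List (Int × Int)) : PySem.Dict Int (List Int) :=
  connections.foldl
    (fun g p => (g.modify p.1 [] (fun l => l ++ [p.2])).modify p.2 [] (fun l => l ++ [p.1]))
    PySem.Dict.empty

-- body of 'for neighbor in graph[current]': if neighbor not in visited: visited.add; queue.append
def ncc_step (st : PySem.Set Int × List Int) (w : Int) : PySem.Set Int × List Int :=
  if !(PySem.Set.contains st.1 w) then (PySem.Set.add st.1 w, st.2 ++ [w]) else st

-- 'while queue': fuel only makes the loop total; it is large enough (proved below) that it never runs out
def ncc_bfs (graph : PySem.Dict Int (List Int)) : Nat → List Int → PySem.Set Int → PySem.Set Int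
  | 0, _, vis => vis
  | _ + 1, [], vis => vis
  | f + 1, c :: q, vis =>
      let st := (graph.getD c []).foldl ncc_step (vis, q)
      ncc_bfs graph f st.2 st.1

def network_connectivity_check (n : Int) (connections : List (Int × Int)) (start_node : Int) : List Int :=
  let graph := ncc_graph connections
  let visited : PySem.Set Int := PySem.Set.add PySem.Set.empty start_node
  PySem.List.sorted (ncc_bfs graph (4 * connections.length + 1) [start_node] visited) (fun x => x) false

-- ===== PORT B =====
-- body of 'for a, b in connections': if a in comp or b in comp: comp.add(a); comp.add(b)
def ncc_relax (comp : PySem.Set Int) (p : Int × Int) : PySem.Set Int :=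
  if PySem.Set.contains comp p.1 || PySem.Set.contains comp p.2 then
    PySem.Set.add (PySem.Set.add comp p.1) p.2
  else comp

def ncc_pass (connections : List (Int × Int)) (comp : PySem.Set Int) : PySem.Set Int :=
  connections.foldl ncc_relax comp

def network_connectivity_check_alt (n : Int) (connections : List (Int × Int)) (start_node : Int) : List Int :=
  let comp0 : PySem.Set Int := PySem.Set.ofList [start_node]
  let comp := (PySem.List.pyRange 0 (2 * (connections.length : Int) + 1) 1).foldl
      (fun c _ => ncc_pass connections c) comp0
  PySem.List.sorted comp (fun x => x) false

-- ===== PRECONDITION & SPEC =====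
def Spec_network_connectivity_check (n : Int) (connections : List (Int × Int)) (start_node : Int) (out : List Int) : Prop := out = network_connectivity_check_alt n connections start_node
instance (n : Int) (connections : List (Int × Int)) (start_node : Int) (out : List Int) : Decidable (Spec_network_connectivity_check n connections start_node out) := by unfold Spec_network_connectivity_check; infer_instance

-- ===== CLAIM (what is proved, stated in full; the proofs are below) =====
def Claim_equal_network_connectivity_check : Prop := ∀ (n : Int) (connections : List (Int × Int)) (start_node : Int), Dom_network_connectivity_check n connections start_node → Spec_network_connectivity_check n connections start_node (network_connectivity_check n connections start_node)

-- ===== LEMMAS AND PROOFS =====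

-- the symmetric edge relation and reachability from the start node
def pvAdj (connections : List (Int × Int)) (v w : Int) : Prop :=
  ∃ p ∈ connections, (p.1 = v ∧ p.2 = w) ∨ (p.1 = w ∧ p.2 = v)

def pvReach (connections : List (Int × Int)) (start x : Int) : Prop :=
  Relation.ReflTransGen (pvAdj connections) start x

-- universe of nodes: start plus all edge endpoints
def pvU (connections : List (Int × Int)) (start : Int) : PySem.Set Int :=
  PySem.Set.ofList (start :: connections.flatMap (fun p => [p.1, p.2]))

theorem pvAdj_symm {connections : List (Int × Int)} {v w : Int}
    (h : pvAdj connections v w) : pvAdj connections w v := by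
  obtain ⟨p, hp, h⟩ := h
  exact ⟨p, hp, by tauto⟩

theorem pvReach_adj {connections : List (Int × Int)} {s v w : Int}
    (h : pvReach connections s v) (ha : pvAdj connections v w) : pvReach connections s w :=
  Relation.ReflTransGen.tail h ha

theorem mem_pvU_left {connections : List (Int × Int)} {s v w : Int}
    (h : pvAdj connections v w) : v ∈ pvU connections s := by
  obtain ⟨p, hp, h⟩ := h
  simp only [pvU, PySem.Set.mem_ofList, List.mem_cons, List.mem_flatMap]
  rcases h with ⟨h1, _⟩ | ⟨_, h2⟩
  · exact Or.inr ⟨p, hp, by simp [← h1]⟩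
  · exact Or.inr ⟨p, hp, by simp [← h2]⟩

theorem mem_pvU_right {connections : List (Int × Int)} {s v w : Int}
    (h : pvAdj connections v w) : w ∈ pvU connections s :=
  mem_pvU_left (pvAdj_symm h)

theorem start_mem_pvU (connections : List (Int × Int)) (s : Int) : s ∈ pvU connections s := by
  simp [pvU, PySem.Set.mem_ofList]

theorem length_flatMap_pairs (connections : List (Int × Int)) :
    (connections.flatMap (fun p => [p.1, p.2])).length = 2 * connections.length := by
  induction connections with
  | nil => simp
  | cons c t ih =>
      simp only [List.flatMap_cons, List.length_append, List.length_cons, List.length_nil, ih]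
      omega

theorem length_pvU_le (connections : List (Int × Int)) (s : Int) :
    (pvU connections s).length ≤ 2 * connections.length + 1 := by
  have h1 := PySem.Set.length_ofList_le (s :: connections.flatMap (fun p => [p.1, p.2]))
  have h2 := length_flatMap_pairs connections
  unfold pvU
  simp only [List.length_cons] at h1
  omega

-- adjacency-dict correctness: the neighbour list of v holds exactly the pvAdj-neighbours of v
theorem ncc_graph_mem (connections : List (Int × Int)) (v w : Int) :
    w ∈ (ncc_graph connections).getD v [] ↔ pvAdj connections v w := by
  induction connections using List.reverseRecOn generalizing v w with
  | nil => simp [ncc_graph, pvAdj, PySem.Dict.getD_empty]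
  | append_singleton cs p ih =>
      have hg : ncc_graph (cs ++ [p]) =
          ((ncc_graph cs).modify p.1 [] (fun l => l ++ [p.2])).modify p.2 []
            (fun l => l ++ [p.1]) := by
        simp [ncc_graph, List.foldl_append]
      have hadj : pvAdj (cs ++ [p]) v w ↔
          pvAdj cs v w ∨ (p.1 = v ∧ p.2 = w) ∨ (p.1 = w ∧ p.2 = v) := by
        simp only [pvAdj, List.mem_append, List.mem_singleton]
        constructor
        · rintro ⟨q, hq | rfl, h⟩
          · exact Or.inl ⟨q, hq, h⟩
          · tauto
        · rintro (⟨q, hq, h⟩ | h)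
          · exact ⟨q, Or.inl hq, h⟩
          · exact ⟨p, Or.inr rfl, h⟩
      rw [hg, hadj, PySem.Dict.getD_modify, PySem.Dict.getD_modify, PySem.Dict.getD_modify]
      by_cases h2 : v = p.2 <;> by_cases h1 : v = p.1 <;> by_cases h3 : p.1 = p.2 <;>
        simp [h1, h2, h3, List.mem_append, ih, eq_comm]


-- ===== B-side lemmas =====

theorem exists_append_add (s : PySem.Set Int) (x : Int) :
    ∃ t, PySem.Set.add s x = s ++ t := by
  by_cases h : x ∈ s
  · exact ⟨[], by simp [PySem.Set.add_of_mem h]⟩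
  · exact ⟨[x], PySem.Set.add_of_not_mem h⟩

theorem exists_append_relax (comp : PySem.Set Int) (p : Int × Int) :
    ∃ t, ncc_relax comp p = comp ++ t := by
  unfold ncc_relax
  split_ifs
  · obtain ⟨t1, h1⟩ := exists_append_add comp p.1
    obtain ⟨t2, h2⟩ := exists_append_add (PySem.Set.add comp p.1) p.2
    exact ⟨t1 ++ t2, by rw [h2, h1, List.append_assoc]⟩
  · exact ⟨[], by simp⟩

theorem exists_append_fold_relax (l : List (Int × Int)) :
    ∀ comp : PySem.Set Int, ∃ t, l.foldl ncc_relax comp = comp ++ t := by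
  induction l with
  | nil => exact fun comp => ⟨[], by simp⟩
  | cons p l ih =>
      intro comp
      obtain ⟨t1, h1⟩ := exists_append_relax comp p
      obtain ⟨t2, h2⟩ := ih (ncc_relax comp p)
      rw [h1] at h2
      exact ⟨t1 ++ t2, by rw [List.foldl_cons, h1, h2, List.append_assoc]⟩

theorem mem_fold_relax_of_mem {l : List (Int × Int)} {comp : PySem.Set Int} {x : Int}
    (h : x ∈ comp) : x ∈ l.foldl ncc_relax comp := by
  obtain ⟨t, ht⟩ := exists_append_fold_relax l comp
  rw [ht]; exact List.mem_append_left _ h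

theorem nodup_fold_relax (l : List (Int × Int)) :
    ∀ comp : PySem.Set Int, comp.Nodup → (l.foldl ncc_relax comp).Nodup := by
  induction l with
  | nil => exact fun comp h => h
  | cons p l ih =>
      intro comp h
      refine ih _ ?_
      unfold ncc_relax
      split_ifs
      · exact PySem.Set.nodup_add _ _ (PySem.Set.nodup_add _ _ h)
      · exact h

theorem fold_relax_sound (conns : List (Int × Int)) (st : Int) (l : List (Int × Int))
    (hsub : ∀ p ∈ l, p ∈ conns) :
    ∀ comp : PySem.Set Int, (∀ x ∈ comp, pvReach conns st x) →
      ∀ x ∈ l.foldl ncc_relax comp, pvReach conns st x := by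
  induction l with
  | nil => exact fun comp h => h
  | cons p l ih =>
      intro comp h
      have hp : p ∈ conns := hsub p (List.mem_cons_self ..)
      refine ih (fun q hq => hsub q (List.mem_cons_of_mem _ hq)) _ ?_
      intro x hx
      unfold ncc_relax at hx
      split_ifs at hx with hc
      · have hx' := (PySem.Set.mem_add _ _ _).mp hx
        rcases hx' with hx' | rfl
        · rcases (PySem.Set.mem_add _ _ _).mp hx' with hx'' | rfl
          · exact h _ hx''
          · -- x = p.1
            rcases Bool.or_eq_true_iff.mp hc with hc1 | hc2
            · exact h _ ((PySem.Set.contains_iff _ _).mp hc1)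
            · exact pvReach_adj (h _ ((PySem.Set.contains_iff _ _).mp hc2))
                ⟨p, hp, Or.inr ⟨rfl, rfl⟩⟩
        · -- x = p.2
          rcases Bool.or_eq_true_iff.mp hc with hc1 | hc2
          · exact pvReach_adj (h _ ((PySem.Set.contains_iff _ _).mp hc1))
              ⟨p, hp, Or.inl ⟨rfl, rfl⟩⟩
          · exact h _ ((PySem.Set.contains_iff _ _).mp hc2)
      · exact h _ hx

theorem fold_relax_subset_U (conns : List (Int × Int)) (st : Int) (l : List (Int × Int))
    (hsub : ∀ p ∈ l, p ∈ conns) :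
    ∀ comp : PySem.Set Int, (∀ x ∈ comp, x ∈ pvU conns st) →
      ∀ x ∈ l.foldl ncc_relax comp, x ∈ pvU conns st := by
  induction l with
  | nil => exact fun comp h => h
  | cons p l ih =>
      intro comp h
      have hp : p ∈ conns := hsub p (List.mem_cons_self ..)
      have hadj : pvAdj conns p.1 p.2 := ⟨p, hp, Or.inl ⟨rfl, rfl⟩⟩
      refine ih (fun q hq => hsub q (List.mem_cons_of_mem _ hq)) _ ?_
      intro x hx
      unfold ncc_relax at hx
      split_ifs at hx
      · rcases (PySem.Set.mem_add _ _ _).mp hx with hx' | rfl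
        · rcases (PySem.Set.mem_add _ _ _).mp hx' with hx'' | rfl
          · exact h _ hx''
          · exact mem_pvU_left hadj
        · exact mem_pvU_right hadj
      · exact h _ hx

theorem pass_active (conns : List (Int × Int)) (comp : PySem.Set Int) :
    ∀ p ∈ conns, (p.1 ∈ comp ∨ p.2 ∈ comp) →
      p.1 ∈ ncc_pass conns comp ∧ p.2 ∈ ncc_pass conns comp := by
  intro p hp hmem
  obtain ⟨l1, l2, rfl⟩ := List.append_of_mem hp
  unfold ncc_pass
  rw [List.foldl_append, List.foldl_cons]
  set mid := l1.foldl ncc_relax comp with hmiddef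
  obtain ⟨t, ht⟩ := exists_append_fold_relax l1 comp
  have h1 : p.1 ∈ mid ∨ p.2 ∈ mid := by
    rw [hmiddef, ht]
    exact hmem.imp (List.mem_append_left _) (List.mem_append_left _)
  have hc : (PySem.Set.contains mid p.1 || PySem.Set.contains mid p.2) = true := by
    rcases h1 with h1 | h1
    · exact Bool.or_eq_true_iff.mpr (Or.inl ((PySem.Set.contains_iff _ _).mpr h1))
    · exact Bool.or_eq_true_iff.mpr (Or.inr ((PySem.Set.contains_iff _ _).mpr h1))
  have hrel : ncc_relax mid p = PySem.Set.add (PySem.Set.add mid p.1) p.2 := by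
    unfold ncc_relax; rw [if_pos hc]
  constructor
  · exact mem_fold_relax_of_mem (by
      rw [hrel]
      exact (PySem.Set.mem_add _ _ _).mpr (Or.inl ((PySem.Set.mem_add _ _ _).mpr (Or.inr rfl))))
  · exact mem_fold_relax_of_mem (by
      rw [hrel]
      exact (PySem.Set.mem_add _ _ _).mpr (Or.inr rfl))

theorem foldl_const_iterate {α β : Type} (f : α → α) (l : List β) :
    ∀ x : α, l.foldl (fun c _ => f c) x = f^[l.length] x := by
  induction l with
  | nil => intro x; simp
  | cons b l ih =>
      intro x
      rw [List.foldl_cons, ih, List.length_cons, Function.iterate_succ_apply]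

-- iterate invariants
theorem iter_nodup (conns : List (Int × Int)) (s : Int) (k : Nat) :
    ((ncc_pass conns)^[k] (PySem.Set.ofList [s])).Nodup := by
  induction k with
  | zero => simp
  | succ k ih =>
      rw [Function.iterate_succ_apply']
      exact nodup_fold_relax conns _ ih

theorem iter_subU (conns : List (Int × Int)) (s : Int) (k : Nat) :
    ∀ x ∈ (ncc_pass conns)^[k] (PySem.Set.ofList [s]), x ∈ pvU conns s := by
  induction k with
  | zero =>
      intro x hx
      have : x = s := by simpa using hx
      exact this ▸ start_mem_pvU conns s
  | succ k ih =>
      rw [Function.iterate_succ_apply']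
      exact fold_relax_subset_U conns s conns (fun p hp => hp) _ ih

theorem iter_mem_start (conns : List (Int × Int)) (s : Int) (k : Nat) :
    s ∈ (ncc_pass conns)^[k] (PySem.Set.ofList [s]) := by
  induction k with
  | zero => simp
  | succ k ih =>
      rw [Function.iterate_succ_apply']
      exact mem_fold_relax_of_mem ih

theorem iter_sound (conns : List (Int × Int)) (s : Int) (k : Nat) :
    ∀ x ∈ (ncc_pass conns)^[k] (PySem.Set.ofList [s]), pvReach conns s x := by
  induction k with
  | zero =>
      intro x hx
      have : x = s := by simpa using hx
      exact this ▸ Relation.ReflTransGen.refl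
  | succ k ih =>
      rw [Function.iterate_succ_apply']
      exact fold_relax_sound conns s conns (fun p hp => hp) _ ih

theorem iter_len (conns : List (Int × Int)) (s : Int) (k : Nat)
    (h : ∀ j, j < k → (ncc_pass conns)^[j + 1] (PySem.Set.ofList [s]) ≠
        (ncc_pass conns)^[j] (PySem.Set.ofList [s])) :
    k + 1 ≤ ((ncc_pass conns)^[k] (PySem.Set.ofList [s])).length := by
  induction k with
  | zero => simp [PySem.Set.ofList]
  | succ k ih =>
      have hk := ih (fun j hj => h j (by omega))
      have hne := h k (by omega)
      rw [Function.iterate_succ_apply'] at hne ⊢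
      obtain ⟨t, ht⟩ := exists_append_fold_relax conns ((ncc_pass conns)^[k] (PySem.Set.ofList [s]))
      have hpass : ncc_pass conns ((ncc_pass conns)^[k] (PySem.Set.ofList [s])) =
          (ncc_pass conns)^[k] (PySem.Set.ofList [s]) ++ t := ht
      have htne : t ≠ [] := by
        intro h0
        exact hne (by simp [hpass, h0])
      have : 1 ≤ t.length := by
        cases t with
        | nil => exact absurd rfl htne
        | cons a t => simp
      rw [hpass, List.length_append]
      omega

-- after enough passes the component set is a fixpoint of ncc_pass
theorem exists_pass_fixpoint (conns : List (Int × Int)) (s : Int) :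
    ncc_pass conns ((ncc_pass conns)^[2 * conns.length + 1] (PySem.Set.ofList [s])) =
      (ncc_pass conns)^[2 * conns.length + 1] (PySem.Set.ofList [s]) := by
  by_contra h
  have hall : ∀ j, j ≤ 2 * conns.length + 1 →
      (ncc_pass conns)^[j + 1] (PySem.Set.ofList [s]) ≠
        (ncc_pass conns)^[j] (PySem.Set.ofList [s]) := by
    intro j hj hfix
    apply h
    have hfix' : ncc_pass conns ((ncc_pass conns)^[j] (PySem.Set.ofList [s])) =
        (ncc_pass conns)^[j] (PySem.Set.ofList [s]) := by
      rw [show ncc_pass conns ((ncc_pass conns)^[j] (PySem.Set.ofList [s])) =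
          (ncc_pass conns)^[j + 1] (PySem.Set.ofList [s]) from
        (Function.iterate_succ_apply' (ncc_pass conns) j (PySem.Set.ofList [s])).symm]
      exact hfix
    have hN : (ncc_pass conns)^[2 * conns.length + 1] (PySem.Set.ofList [s]) =
        (ncc_pass conns)^[j] (PySem.Set.ofList [s]) := by
      have : 2 * conns.length + 1 = (2 * conns.length + 1 - j) + j := by omega
      rw [this, Function.iterate_add_apply,
        Function.iterate_fixed hfix' (2 * conns.length + 1 - j)]
    rw [hN, hfix']
  have hlen := iter_len conns s (2 * conns.length + 2) (fun j hj => hall j (by omega))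
  have hle : ((ncc_pass conns)^[2 * conns.length + 2] (PySem.Set.ofList [s])).length ≤
      (pvU conns s).length :=
    ((iter_nodup conns s _).subperm (fun x hx => iter_subU conns s _ x hx)).length_le
  have := length_pvU_le conns s
  omega

theorem B_char (conns : List (Int × Int)) (s : Int) :
    (∀ x, x ∈ (ncc_pass conns)^[2 * conns.length + 1] (PySem.Set.ofList [s]) ↔ pvReach conns s x) ∧
      ((ncc_pass conns)^[2 * conns.length + 1] (PySem.Set.ofList [s])).Nodup := by
  have hfix := exists_pass_fixpoint conns s
  have hclosed : ∀ x y, x ∈ (ncc_pass conns)^[2 * conns.length + 1] (PySem.Set.ofList [s]) →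
      pvAdj conns x y → y ∈ (ncc_pass conns)^[2 * conns.length + 1] (PySem.Set.ofList [s]) := by
    intro x y hx hadj
    obtain ⟨p, hp, hcase⟩ := hadj
    rcases hcase with ⟨h1, h2⟩ | ⟨h1, h2⟩
    · have := (pass_active conns _ p hp (Or.inl (h1 ▸ hx))).2
      rw [hfix] at this
      exact h2 ▸ this
    · have := (pass_active conns _ p hp (Or.inr (h2 ▸ hx))).1
      rw [hfix] at this
      exact h1 ▸ this
  refine ⟨fun x => ⟨iter_sound conns s _ x, ?_⟩, iter_nodup conns s _⟩
  intro hr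
  induction hr with
  | refl => exact iter_mem_start conns s _
  | tail _ hadj ih => exact hclosed _ _ ih hadj

-- ===== A-side lemmas =====

-- one inner 'for neighbor in graph[current]' loop: visited and queue grow by the same new elements
theorem step_fold (ns : List Int) :
    ∀ (v0 : PySem.Set Int) (q0 : List Int), ∃ t : List Int,
      (ns.foldl ncc_step (v0, q0)).1 = v0 ++ t ∧
      (ns.foldl ncc_step (v0, q0)).2 = q0 ++ t ∧
      (∀ x ∈ t, x ∈ ns) ∧
      (v0.Nodup → (v0 ++ t).Nodup) ∧
      (∀ w ∈ ns, w ∈ (ns.foldl ncc_step (v0, q0)).1) := by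
  induction ns with
  | nil => exact fun v0 q0 => ⟨[], by simp, by simp, by simp, by simp, by simp⟩
  | cons w ns ih =>
      intro v0 q0
      by_cases h : w ∈ v0
      · have hstep : ncc_step (v0, q0) w = (v0, q0) := by
          have hcw : PySem.Set.contains v0 w = true := (PySem.Set.contains_iff _ _).mpr h
          unfold ncc_step
          rw [if_neg (by simpa using h)]
        obtain ⟨t, h1, h2, h3, h4, h5⟩ := ih v0 q0
        refine ⟨t, ?_, ?_, ?_, h4, ?_⟩
        · rw [List.foldl_cons, hstep]; exact h1
        · rw [List.foldl_cons, hstep]; exact h2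
        · exact fun x hx => List.mem_cons_of_mem _ (h3 x hx)
        · intro u hu
          rw [List.foldl_cons, hstep]
          rcases List.mem_cons.mp hu with rfl | hu'
          · rw [h1]; exact List.mem_append_left _ h
          · exact h5 u hu'
      · have hstep : ncc_step (v0, q0) w = (v0 ++ [w], q0 ++ [w]) := by
          have hcw : PySem.Set.contains v0 w = false :=
            Bool.eq_false_iff.mpr fun hct => h ((PySem.Set.contains_iff _ _).mp hct)
          unfold ncc_step
          rw [if_pos (by simpa using h), PySem.Set.add_of_not_mem h]
        obtain ⟨t, h1, h2, h3, h4, h5⟩ := ih (v0 ++ [w]) (q0 ++ [w])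
        refine ⟨w :: t, ?_, ?_, ?_, ?_, ?_⟩
        · rw [List.foldl_cons, hstep, h1, List.append_assoc]; rfl
        · rw [List.foldl_cons, hstep, h2, List.append_assoc]; rfl
        · intro x hx
          rcases List.mem_cons.mp hx with rfl | hx'
          · exact List.mem_cons_self ..
          · exact List.mem_cons_of_mem _ (h3 x hx')
        · intro hnd
          have hdisj : v0.Disjoint [w] := by
            intro a ha hb
            rw [List.mem_singleton] at hb
            subst hb; exact h ha
          have : (v0 ++ [w]).Nodup := hnd.append (List.nodup_singleton w) hdisj
          have := h4 this
          rwa [List.append_assoc] at this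
        · intro u hu
          rw [List.foldl_cons, hstep]
          rcases List.mem_cons.mp hu with rfl | hu'
          · rw [h1]
            exact List.mem_append_left _ (List.mem_append_right _ (List.mem_cons_self ..))
          · exact h5 u hu'

-- BFS main invariant lemma
theorem bfs_main (conns : List (Int × Int)) (start : Int) :
    ∀ (f : Nat) (q : List Int) (vis : PySem.Set Int),
      vis.Nodup →
      (∀ x ∈ vis, x ∈ pvU conns start) →
      (∀ x ∈ q, x ∈ vis) →
      (∀ v ∈ vis, v ∈ q ∨ ∀ w, pvAdj conns v w → w ∈ vis) →
      (∀ x ∈ vis, pvReach conns start x) →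
      q.length + 2 * ((pvU conns start).length - vis.length) ≤ f →
      (∀ x ∈ vis, x ∈ ncc_bfs (ncc_graph conns) f q vis) ∧
      (∀ x ∈ ncc_bfs (ncc_graph conns) f q vis, pvReach conns start x) ∧
      (∀ v ∈ ncc_bfs (ncc_graph conns) f q vis, ∀ w, pvAdj conns v w →
        w ∈ ncc_bfs (ncc_graph conns) f q vis) ∧
      (ncc_bfs (ncc_graph conns) f q vis).Nodup := by
  intro f
  induction f with
  | zero =>
      intro q vis hnd hsub hqv hH hreach hfuel
      have hq : q = [] := by
        cases q with
        | nil => rfl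
        | cons a q => simp at hfuel
      subst hq
      refine ⟨fun x hx => hx, hreach, ?_, hnd⟩
      intro v hv w hadj
      rcases hH v hv with hv' | hcl
      · exact absurd hv' (List.not_mem_nil)
      · exact hcl w hadj
  | succ f ih =>
      intro q vis hnd hsub hqv hH hreach hfuel
      cases q with
      | nil =>
          refine ⟨fun x hx => hx, hreach, ?_, hnd⟩
          intro v hv w hadj
          rcases hH v hv with hv' | hcl
          · exact absurd hv' (List.not_mem_nil)
          · exact hcl w hadj
      | cons c q' =>
          have hc : c ∈ vis := hqv c (List.mem_cons_self ..)
          obtain ⟨t, hv1, hq1, htns, hnd', hcov⟩ :=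
            step_fold ((ncc_graph conns).getD c []) vis q'
          have hred : ncc_bfs (ncc_graph conns) (f + 1) (c :: q') vis =
              ncc_bfs (ncc_graph conns) f
                (((ncc_graph conns).getD c []).foldl ncc_step (vis, q')).2
                (((ncc_graph conns).getD c []).foldl ncc_step (vis, q')).1 := rfl
          rw [hred, hv1, hq1]
          have htadj : ∀ x ∈ t, pvAdj conns c x := by
            intro x hx
            exact (ncc_graph_mem conns c x).mp (htns x hx)
          have hnd2 : (vis ++ t).Nodup := hnd' hnd
          have hsub2 : ∀ x ∈ vis ++ t, x ∈ pvU conns start := by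
            intro x hx
            rcases List.mem_append.mp hx with hx | hx
            · exact hsub x hx
            · exact mem_pvU_right (htadj x hx)
          have hqv2 : ∀ x ∈ q' ++ t, x ∈ vis ++ t := by
            intro x hx
            rcases List.mem_append.mp hx with hx | hx
            · exact List.mem_append_left _ (hqv x (List.mem_cons_of_mem _ hx))
            · exact List.mem_append_right _ hx
          have hH2 : ∀ v ∈ vis ++ t, v ∈ q' ++ t ∨ ∀ w, pvAdj conns v w → w ∈ vis ++ t := by
            intro v hv
            rcases List.mem_append.mp hv with hv | hv
            · rcases hH v hv with hv' | hcl
              · rcases List.mem_cons.mp hv' with rfl | hv''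
                · right
                  intro w hadj
                  have hw : w ∈ ((ncc_graph conns).getD v []) := (ncc_graph_mem conns v w).mpr hadj
                  have := hcov w hw
                  rwa [hv1] at this
                · exact Or.inl (List.mem_append_left _ hv'')
              · exact Or.inr fun w hadj => List.mem_append_left _ (hcl w hadj)
            · exact Or.inl (List.mem_append_right _ hv)
          have hreach2 : ∀ x ∈ vis ++ t, pvReach conns start x := by
            intro x hx
            rcases List.mem_append.mp hx with hx | hx
            · exact hreach x hx
            · exact pvReach_adj (hreach c hc) (htadj x hx)
          have hfuel2 : (q' ++ t).length + 2 * ((pvU conns start).length - (vis ++ t).length) ≤ f := by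
            have hle : (vis ++ t).length ≤ (pvU conns start).length :=
              (hnd2.subperm (fun x hx => hsub2 x hx)).length_le
            have hle' : vis.length ≤ (pvU conns start).length :=
              (hnd.subperm (fun x hx => hsub x hx)).length_le
            simp only [List.length_append, List.length_cons] at hfuel hle ⊢
            omega
          obtain ⟨P1, P2, P3, P4⟩ := ih (q' ++ t) (vis ++ t) hnd2 hsub2 hqv2 hH2 hreach2 hfuel2
          exact ⟨fun x hx => P1 x (List.mem_append_left _ hx), P2, P3, P4⟩

theorem A_char (conns : List (Int × Int)) (s : Int) :
    (∀ x, x ∈ ncc_bfs (ncc_graph conns) (4 * conns.length + 1) [s]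
        (PySem.Set.add PySem.Set.empty s) ↔ pvReach conns s x) ∧
      (ncc_bfs (ncc_graph conns) (4 * conns.length + 1) [s]
        (PySem.Set.add PySem.Set.empty s)).Nodup := by
  have hvis0 : PySem.Set.add PySem.Set.empty s = [s] := rfl
  have hUlen := length_pvU_le conns s
  have hUpos : 1 ≤ (pvU conns s).length := by
    have := start_mem_pvU conns s
    cases h : (pvU conns s) with
    | nil => rw [h] at this; exact absurd this (List.not_mem_nil)
    | cons a l => simp
  obtain ⟨P1, P2, P3, P4⟩ := bfs_main conns s (4 * conns.length + 1) [s]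
    (PySem.Set.add PySem.Set.empty s)
    (by rw [hvis0]; simp)
    (by rw [hvis0]; intro x hx; rcases List.mem_singleton.mp hx with rfl; exact start_mem_pvU conns _)
    (by rw [hvis0]; exact fun x hx => hx)
    (by rw [hvis0]; intro v hv; exact Or.inl hv)
    (by rw [hvis0]; intro x hx; rcases List.mem_singleton.mp hx with rfl; exact Relation.ReflTransGen.refl)
    (by rw [hvis0]; simp only [List.length_singleton]; omega)
  refine ⟨fun x => ⟨P2 x, ?_⟩, P4⟩
  intro hr
  induction hr with
  | refl => exact P1 s (by rw [hvis0]; exact List.mem_singleton.mpr rfl)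
  | tail _ hadj ih => exact P3 _ ih _ hadj

-- ===== VERDICT (by name: the statement is the Claim_ definition above) =====
theorem network_connectivity_check_spec : Claim_equal_network_connectivity_check := by
  intro n conns s _
  show PySem.List.sorted
      (ncc_bfs (ncc_graph conns) (4 * conns.length + 1) [s] (PySem.Set.add PySem.Set.empty s))
      (fun x => x) false =
    PySem.List.sorted
      ((PySem.List.pyRange 0 (2 * (conns.length : Int) + 1) 1).foldl
        (fun c _ => ncc_pass conns c) (PySem.Set.ofList [s]))
      (fun x => x) false
  rw [foldl_const_iterate (ncc_pass conns)]
  have hlen : (PySem.List.pyRange 0 (2 * (conns.length : Int) + 1) 1).length =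
      2 * conns.length + 1 := by
    rw [PySem.List.length_pyRange_one]
    omega
  rw [hlen]
  apply PySem.List.sorted_eq_sorted_of_perm _ _ _ (fun a b hab => hab)
  rw [List.perm_ext_iff_of_nodup (A_char conns s).2 (B_char conns s).2]
  intro x
  rw [(A_char conns s).1 x, (B_char conns s).1 x]
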